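-- pv_equiv track=rewrite | github.com/eliottcassidy2000/math | 04-computation/topological_spectral_bridge.py | compute_omega_dims
-- ===== SOURCE A (Python) =====
-- def compute_omega_dims(adj, n, max_dim=None):
--     """Compute allowed path complex dimensions Ω_0, Ω_1, ..., Ω_{max_dim}."""
--     if max_dim is None:
--         max_dim = n - 1
--
--     # Ω_k = number of allowed (k+1)-paths v_0 → v_1 → ... → v_k
--     # where all faces are also allowed
--     # An allowed k-path: all v_i distinct, all consecutive arcs present,
--     # and for k ≥ 2, all faces (paths with one interior vertex removed) are allowed.
--
--     # For GLMY: an allowed p-path is a sequence (v_0,...,v_p) where: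
--     # 1. A[v_i][v_{i+1}] = 1 for all i
--     # 2. v_i ≠ v_j for all i ≠ j
--     # 3. All (p-1)-faces (removing interior vertices) are also allowed paths
--
--     # Start with allowed 1-paths (edges)
--     from itertools import permutations
--
--     # Build allowed paths level by level
--     allowed = {}
--
--     # Level 0: vertices
--     allowed[0] = [(v,) for v in range(n)]
--
--     # Level 1: edges (arcs)
--     allowed[1] = [(i, j) for i in range(n) for j in range(n)
--                   if adj[i][j] == 1 and i != j]
--
--     for p in range(2, max_dim + 1):
--         # A p-path is (v_0, ..., v_p) where:
--         # - all consecutive arcs exist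
--         # - all distinct
--         # - all faces (remove v_i for 0 < i < p) are in allowed[p-1]
--
--         # For efficiency, extend (p-1)-paths by one vertex
--         prev_set = set(allowed[p-1])
--         new_paths = []
--
--         for path in allowed[p-1]:
--             last = path[-1]
--             verts = set(path)
--             for v in range(n):
--                 if v in verts:
--                     continue
--                 if adj[last][v] != 1:
--                     continue
--                 # Check face condition: remove each interior vertex
--                 candidate = path + (v,)
--                 valid = True
--                 for i in range(1, p):  # remove vertex at position i
--                     face = candidate[:i] + candidate[i+1:]
--                     if face not in prev_set:
--                         valid = False
--                         break
--                 if valid: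
--                     new_paths.append(candidate)
--
--         allowed[p] = new_paths
--
--     return {k: len(allowed[k]) for k in range(max_dim + 1)}
-- ===== SOURCE B (Python) =====
-- def compute_omega_dims(adj, n, max_dim=None):
--     """Two phases: DFS-enumerate all directed simple arc-paths, then accept
--     them level by level with the GLMY face checks."""
--     if max_dim is None:
--         max_dim = n - 1
--
--     # phase 1: from every vertex, walk along arcs over distinct vertices,
--     # collecting every simple path with at most max_dim+1 vertices
--     paths = []
--
--     def dfs(path):
--         paths.append(tuple(path))
--         if len(path) > max_dim:
--             return
--         last = path[-1]
--         for v in range(n):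
--             if adj[last][v] == 1 and v not in path:
--                 path.append(v)
--                 dfs(path)
--                 path.pop()
--
--     if max_dim >= 1:
--         for s in range(n):
--             dfs([s])
--
--     # phase 2: accept candidates level by level
--     counts = {}
--     if max_dim >= 0:
--         counts[0] = max(n, 0)
--     if max_dim >= 1:
--         prev = {c for c in paths if len(c) == 2}
--         counts[1] = len(prev)
--         for p in range(2, max_dim + 1):
--             cur = set()
--             for c in paths:
--                 if len(c) == p + 1 and c[:-1] in prev and all(
--                         c[:i] + c[i + 1:] in prev for i in range(1, p)):
--                     cur.add(c)
--             counts[p] = len(cur)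
--             prev = cur
--     return {k: counts.get(k, 0) for k in range(max_dim + 1)}
-- ===== Notes on version B (the rewrite author's own statement) =====
-- stated objective: alternative
-- what changed: B splits generation from acceptance: a recursive DFS first enumerates every directed simple arc-path with at most max_dim+1 vertices into one pool, then a separate level-by-level pass accepts a candidate iff its prefix and all interior-vertex-removed faces lie in the previous accepted set, counting with sets; A instead interleaves the two, extending the previous accepted list vertex by vertex.
import Mathlib
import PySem

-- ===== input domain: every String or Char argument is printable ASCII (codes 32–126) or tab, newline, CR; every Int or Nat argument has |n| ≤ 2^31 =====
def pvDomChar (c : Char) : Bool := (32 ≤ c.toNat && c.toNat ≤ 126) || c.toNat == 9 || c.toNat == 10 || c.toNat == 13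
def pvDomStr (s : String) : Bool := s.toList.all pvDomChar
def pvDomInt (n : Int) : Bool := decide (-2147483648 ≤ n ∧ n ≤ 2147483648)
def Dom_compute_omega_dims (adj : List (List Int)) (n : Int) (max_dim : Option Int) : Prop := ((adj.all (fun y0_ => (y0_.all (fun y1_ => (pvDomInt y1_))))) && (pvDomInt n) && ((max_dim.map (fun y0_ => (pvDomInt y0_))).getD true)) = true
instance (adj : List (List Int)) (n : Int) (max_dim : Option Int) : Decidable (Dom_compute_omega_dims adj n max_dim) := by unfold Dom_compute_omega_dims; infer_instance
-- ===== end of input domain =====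

-- B changes the decomposition: one DFS enumerates all directed simple arc-paths, a second
-- pass accepts them level by level by the GLMY face checks; same return value as A.

-- adj[i][j] (total via defaults; Pre_ keeps us where Python really indexes in range)
def adjAt (adj : List (List Int)) (i j : Int) : Int :=
  PySem.List.pyGetD (PySem.List.pyGetD adj i []) j 0

-- ===== PORT A =====
def compute_omega_dims (adj : List (List Int)) (n : Int) (max_dim : Option Int) : List (Int × Int) :=
  let md := max_dim.getD (n - 1)
  let allowed : PySem.Dict Int (List (List Int)) := PySem.Dict.empty
  let allowed := allowed.insert 0 ((PySem.List.pyRange 0 n 1).map (fun v => [v]))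
  let allowed := allowed.insert 1 ((PySem.List.pyRange 0 n 1).flatMap (fun i =>
      ((PySem.List.pyRange 0 n 1).filter (fun j => adjAt adj i j == 1 && i != j)).map
        (fun j => [i, j])))
  let allowed := (PySem.List.pyRange 2 (md + 1) 1).foldl (fun allowed p =>
      let prevList := allowed.getD (p - 1) []
      let prevSet := PySem.Set.ofList prevList
      let newPaths := prevList.foldl (fun acc path =>
        let last := PySem.List.pyGetD path (-1) 0
        let verts := PySem.Set.ofList path
        (PySem.List.pyRange 0 n 1).foldl (fun acc v =>
          if verts.contains v then acc
          else if adjAt adj last v != 1 then acc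
          else
            let cand := path ++ [v]
            if (PySem.List.pyRange 1 p 1).all (fun i =>
                prevSet.contains (PySem.List.slice cand none (some i) ++
                                  PySem.List.slice cand (some (i + 1)) none)) then
              acc ++ [cand]
            else acc) acc) []
      allowed.insert p newPaths) allowed
  (PySem.List.pyRange 0 (md + 1) 1).map (fun k => (k, ((allowed.getD k []).length : Int)))

-- ===== PORT B =====
-- the recursive dfs of Source B; fuel = n.toNat is never exhausted (a simple path over
-- distinct vertices of range(n) gains at most n.toNat - 1 vertices)
def dfsB (adj : List (List Int)) (n md : Int) : Nat → List Int → List (List Int) → List (List Int)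
  | fuel, path, paths =>
    let paths := paths ++ [path]
    if (path.length : Int) > md then paths
    else
      match fuel with
      | 0 => paths
      | fuel + 1 =>
        let last := PySem.List.pyGetD path (-1) 0
        (PySem.List.pyRange 0 n 1).foldl (fun paths v =>
          if adjAt adj last v == 1 && !(path.contains v) then
            dfsB adj n md fuel (path ++ [v]) paths
          else paths) paths

def compute_omega_dims_alt (adj : List (List Int)) (n : Int) (max_dim : Option Int) : List (Int × Int) :=
  let md := max_dim.getD (n - 1)
  let paths :=
    if md ≥ 1 then
      (PySem.List.pyRange 0 n 1).foldl (fun paths s => dfsB adj n md n.toNat [s] paths) []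
    else []
  let counts : PySem.Dict Int Int := PySem.Dict.empty
  let counts := if md ≥ 0 then counts.insert 0 (max n 0) else counts
  let counts :=
    if md ≥ 1 then
      let prev : PySem.Set (List Int) :=
        PySem.Set.ofList (paths.filter (fun c => c.length == 2))
      let counts := counts.insert 1 (PySem.Set.len prev)
      let st := (PySem.List.pyRange 2 (md + 1) 1).foldl
        (fun (st : PySem.Dict Int Int × PySem.Set (List Int)) p =>
          let cur := paths.foldl (fun cur c =>
            if ((c.length : Int) == p + 1 &&
                PySem.Set.contains st.2 (PySem.List.slice c none (some (-1))) &&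
                (PySem.List.pyRange 1 p 1).all (fun i =>
                  PySem.Set.contains st.2 (PySem.List.slice c none (some i) ++
                                           PySem.List.slice c (some (i + 1)) none))) then
              PySem.Set.add cur c
            else cur) PySem.Set.empty
          (st.1.insert p (PySem.Set.len cur), cur)) (counts, prev)
      st.1
    else counts
  (PySem.List.pyRange 0 (md + 1) 1).map (fun k => (k, counts.getD k 0))

-- ===== PRECONDITION & SPEC =====
-- Pre_ excludes exactly the inputs on which Python A raises IndexError:
-- whenever 0 < n, A indexes adj[i][j] for all i, j < n.
def Pre_compute_omega_dims (adj : List (List Int)) (n : Int) (max_dim : Option Int) : Prop :=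
  n ≤ (adj.length : Int) ∧ ∀ row ∈ adj.take n.toNat, n ≤ (row.length : Int)
instance (adj : List (List Int)) (n : Int) (max_dim : Option Int) : Decidable (Pre_compute_omega_dims adj n max_dim) := by unfold Pre_compute_omega_dims; infer_instance
def pvWitness_compute_omega_dims : List (List Int) × Int × Option Int := ([[0, 1], [1, 0]], 2, none)

def Spec_compute_omega_dims (adj : List (List Int)) (n : Int) (max_dim : Option Int) (out : List (Int × Int)) : Prop := out = compute_omega_dims_alt adj n max_dim
instance (adj : List (List Int)) (n : Int) (max_dim : Option Int) (out : List (Int × Int)) : Decidable (Spec_compute_omega_dims adj n max_dim out) := by unfold Spec_compute_omega_dims; infer_instance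

-- ===== CLAIM (what is proved, stated in full; the proofs are below) =====
def Claim_equal_compute_omega_dims : Prop := ∀ (adj : List (List Int)) (n : Int) (max_dim : Option Int), Dom_compute_omega_dims adj n max_dim → Pre_compute_omega_dims adj n max_dim → Spec_compute_omega_dims adj n max_dim (compute_omega_dims adj n max_dim)

-- ===== LEMMAS AND PROOFS =====


-- simple directed arc-path over distinct vertices of range(n)
def Simple (adj : List (List Int)) (n : Int) (c : List Int) : Prop :=
  c.Nodup ∧ (∀ v ∈ c, 0 ≤ v ∧ v < n) ∧ List.IsChain (fun a b => adjAt adj a b = 1) c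

-- ===== generic list lemmas =====

theorem nodup_len_le (n : Int) (c : List Int) (h : c.Nodup) (hr : ∀ v ∈ c, 0 ≤ v ∧ v < n) :
    c.length ≤ n.toNat := by
  have hsub : c.toFinset ⊆ Finset.Ico 0 n := by
    intro v hv
    rw [List.mem_toFinset] at hv
    have := hr v hv
    simp [Finset.mem_Ico]; omega
  have hcard := Finset.card_le_card hsub
  rw [List.toFinset_card_of_nodup h, Int.card_Ico] at hcard
  omega

theorem foldl_init_append {α β : Type} (l : List β) (g : List α → β → List α)
    (h : ∀ s v, v ∈ l → g s v = s ++ g [] v) :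
    ∀ init, l.foldl g init = init ++ l.foldl g [] := by
  induction l with
  | nil => intro init; simp
  | cons v t ih =>
    intro init
    have hmem : ∀ s w, w ∈ t → g s w = s ++ g [] w := fun s w hw => h s w (List.mem_cons_of_mem _ hw)
    simp only [List.foldl_cons]
    rw [ih hmem (g init v), ih hmem (g [] v), h init v (List.mem_cons_self ..), List.append_assoc]

theorem mem_foldl_add_if {α : Type} [BEq α] [LawfulBEq α] (l : List α) (P : α → Bool) :
    ∀ (s : PySem.Set α) (c : α),
      c ∈ l.foldl (fun s x => if P x then PySem.Set.add s x else s) s ↔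
        c ∈ s ∨ (c ∈ l ∧ P c = true) := by
  induction l with
  | nil => intro s c; simp
  | cons x t ih =>
    intro s c
    simp only [List.foldl_cons]
    rw [ih]
    by_cases hx : P x = true
    · simp only [hx, if_pos]
      rw [PySem.Set.mem_add]
      constructor
      · rintro ((h | rfl) | h)
        · exact Or.inl h
        · exact Or.inr ⟨List.mem_cons_self .., hx⟩
        · exact Or.inr ⟨List.mem_cons_of_mem _ h.1, h.2⟩
      · rintro (h | ⟨hc, hPc⟩)
        · exact Or.inl (Or.inl h)
        · rcases List.mem_cons.mp hc with rfl | hc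
          · exact Or.inl (Or.inr rfl)
          · exact Or.inr ⟨hc, hPc⟩
    · simp only [hx, if_neg, Bool.false_eq_true, not_false_iff]
      constructor
      · rintro (h | h)
        · exact Or.inl h
        · exact Or.inr ⟨List.mem_cons_of_mem _ h.1, h.2⟩
      · rintro (h | ⟨hc, hPc⟩)
        · exact Or.inl h
        · rcases List.mem_cons.mp hc with rfl | hc
          · exact absurd hPc hx
          · exact Or.inr ⟨hc, hPc⟩

theorem nodup_foldl_add_if {α : Type} [BEq α] [LawfulBEq α] (l : List α) (P : α → Bool) :
    ∀ (s : PySem.Set α), s.Nodup →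
      (l.foldl (fun s x => if P x then PySem.Set.add s x else s) s).Nodup := by
  induction l with
  | nil => intro s hs; simpa
  | cons x t ih =>
    intro s hs
    simp only [List.foldl_cons]
    by_cases hx : P x = true
    · simp only [hx, if_pos]
      exact ih _ (PySem.Set.nodup_add s x hs)
    · simp only [hx, if_neg, Bool.false_eq_true, not_false_iff]
      exact ih _ hs

theorem nodup_flatMap_key {α β : Type} (l : List α) (f : α → List β) (key : β → α)
    (hl : l.Nodup) (hf : ∀ a ∈ l, (f a).Nodup) (hkey : ∀ a ∈ l, ∀ b ∈ f a, key b = a) :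
    (l.flatMap f).Nodup := by
  induction l with
  | nil => simp
  | cons a t ih =>
    rw [List.flatMap_cons, List.nodup_append]
    refine ⟨hf a (List.mem_cons_self ..), ih (List.Nodup.of_cons hl)
      (fun a' ha' => hf a' (List.mem_cons_of_mem _ ha'))
      (fun a' ha' => hkey a' (List.mem_cons_of_mem _ ha')), ?_⟩
    intro b hb b' hb'
    rcases List.mem_flatMap.mp hb' with ⟨a', ha', hba'⟩
    intro hbb; subst hbb
    have h1 : key b = a := hkey a (List.mem_cons_self ..) b hb
    have h2 : key b = a' := hkey a' (List.mem_cons_of_mem _ ha') b hba'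
    have : a ∈ t := h1 ▸ h2 ▸ ha'
    exact (List.nodup_cons.mp hl).1 this

-- ===== DFS lemmas =====

theorem dfsB_acc (adj : List (List Int)) (n md : Int) :
    ∀ (fuel : Nat) (path : List Int) (acc : List (List Int)),
      dfsB adj n md fuel path acc = acc ++ dfsB adj n md fuel path [] := by
  intro fuel
  induction fuel with
  | zero =>
    intro path acc
    simp only [dfsB]
    split <;> simp
  | succ fuel ih =>
    intro path acc
    simp only [dfsB]
    split
    · simp
    · have hcomm : ∀ (s : List (List Int)) (v : Int), v ∈ PySem.List.pyRange 0 n →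
          (if (adjAt adj (PySem.List.pyGetD path (-1) 0) v == 1 && !(path.contains v)) then
            dfsB adj n md fuel (path ++ [v]) s else s) =
          s ++ (if (adjAt adj (PySem.List.pyGetD path (-1) 0) v == 1 && !(path.contains v)) then
            dfsB adj n md fuel (path ++ [v]) [] else []) := by
        intro s v _
        by_cases hc : (adjAt adj (PySem.List.pyGetD path (-1) 0) v == 1 && !(path.contains v)) = true
        · simp only [hc, if_pos]
          rw [ih (path ++ [v]) s]
        · simp only [hc, if_neg, Bool.false_eq_true, not_false_iff]
          simp
      rw [foldl_init_append _ _ hcomm (acc ++ [path]),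
        foldl_init_append _ _ hcomm ([] ++ [path])]
      simp

theorem dfsB_succ_eq (adj : List (List Int)) (n md : Int) (fuel : Nat) (path : List Int)
    (acc : List (List Int)) (h : ¬((path.length : Int) > md)) :
    dfsB adj n md (fuel + 1) path acc =
      acc ++ [path] ++ (PySem.List.pyRange 0 n 1).flatMap (fun v =>
        if (adjAt adj (PySem.List.pyGetD path (-1) 0) v == 1 && !(path.contains v)) then
          dfsB adj n md fuel (path ++ [v]) []
        else []) := by
  conv_lhs => rw [dfsB]
  simp only [h, if_neg, not_false_iff]
  have hcongr := PySem.List.foldl_congr_mem (PySem.List.pyRange 0 n)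
    (fun paths v =>
      if (adjAt adj (PySem.List.pyGetD path (-1) 0) v == 1 && !(path.contains v)) then
        dfsB adj n md fuel (path ++ [v]) paths
      else paths)
    (fun s v => s ++ (if (adjAt adj (PySem.List.pyGetD path (-1) 0) v == 1 && !(path.contains v)) then
        dfsB adj n md fuel (path ++ [v]) []
      else []))
    (acc ++ [path]) (by
      intro s v _
      by_cases hc : (adjAt adj (PySem.List.pyGetD path (-1) 0) v == 1 && !(path.contains v)) = true
      · simp only [hc, if_pos]
        exact dfsB_acc adj n md fuel (path ++ [v]) s
      · simp only [hc, if_neg, Bool.false_eq_true, not_false_iff]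
        simp)
  exact hcongr.trans (PySem.List.foldl_append_eq_flatMap _ _ _)

theorem dfsB_zero_eq (adj : List (List Int)) (n md : Int) (path : List Int)
    (acc : List (List Int)) :
    dfsB adj n md 0 path acc = acc ++ [path] := by
  simp only [dfsB]; split <;> rfl

theorem dfsB_stop_eq (adj : List (List Int)) (n md : Int) (fuel : Nat) (path : List Int)
    (acc : List (List Int)) (h : (path.length : Int) > md) :
    dfsB adj n md fuel path acc = acc ++ [path] := by
  cases fuel <;> (simp only [dfsB]; rw [if_pos h])

theorem dfsB_mem (adj : List (List Int)) (n md : Int) :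
    ∀ (fuel : Nat) (path : List Int) (acc : List (List Int)) (c : List Int),
      path ≠ [] → Simple adj n path → n.toNat ≤ fuel + path.length →
      (c ∈ dfsB adj n md fuel path acc ↔
        c ∈ acc ∨ c = path ∨
          (path <+: c ∧ c ≠ path ∧ Simple adj n c ∧ (c.length : Int) ≤ md + 1)) := by
  intro fuel
  induction fuel with
  | zero =>
    intro path acc c hne hsimp hfuel
    rw [dfsB_zero_eq]
    simp only [List.mem_append, List.mem_singleton]
    constructor
    · rintro (h | rfl)
      · exact Or.inl h
      · exact Or.inr (Or.inl rfl)
    · rintro (h | rfl | ⟨hpre, hnepc, hsc, _⟩)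
      · exact Or.inl h
      · exact Or.inr rfl
      · exfalso
        have hlt : path.length < c.length := by
          have := hpre.length_le
          rcases lt_or_eq_of_le this with h' | h'
          · exact h'
          · exact absurd (hpre.eq_of_length h' ▸ rfl) hnepc
        have h1 := nodup_len_le n c hsc.1 hsc.2.1
        omega
  | succ fuel ih =>
    intro path acc c hne hsimp hfuel
    by_cases hstop : (path.length : Int) > md
    · rw [dfsB_stop_eq adj n md _ path acc hstop]
      simp only [List.mem_append, List.mem_singleton]
      constructor
      · rintro (h | rfl)
        · exact Or.inl h
        · exact Or.inr (Or.inl rfl)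
      · rintro (h | rfl | ⟨hpre, hnepc, hsc, hlen⟩)
        · exact Or.inl h
        · exact Or.inr rfl
        · exfalso
          have hlt : path.length < c.length := by
            have := hpre.length_le
            rcases lt_or_eq_of_le this with h' | h'
            · exact h'
            · exact absurd (hpre.eq_of_length h' ▸ rfl) hnepc
          omega
    · rw [dfsB_succ_eq adj n md fuel path acc hstop]
      have hlast : PySem.List.pyGetD path (-1) 0 = path.getLast hne :=
        PySem.List.pyGetD_neg_one path 0 hne
      simp only [List.mem_append, List.mem_singleton, List.mem_flatMap]
      constructor
      · rintro ((h | rfl) | ⟨v, hv, hvmem⟩)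
        · exact Or.inl h
        · exact Or.inr (Or.inl rfl)
        · -- v produced c
          rcases PySem.List.mem_pyRange_one.mp hv with ⟨hv0, hvn⟩
          by_cases hc : (adjAt adj (PySem.List.pyGetD path (-1) 0) v == 1 && !(path.contains v)) = true
          swap
          · rw [if_neg hc] at hvmem; simp at hvmem
          rw [if_pos hc] at hvmem
          have hedge : adjAt adj (path.getLast hne) v = 1 := by
            have := (Bool.and_eq_true _ _).mp hc |>.1
            rw [hlast] at this
            exact beq_iff_eq.mp this
          have hvnot : v ∉ path := by
            have := (Bool.and_eq_true _ _).mp hc |>.2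
            simpa using this
          have hsimp' : Simple adj n (path ++ [v]) := by
            refine ⟨?_, ?_, ?_⟩
            · rw [List.nodup_append]
              exact ⟨hsimp.1, List.nodup_singleton v, by
                intro a ha b hb hab
                rw [List.mem_singleton] at hb
                subst hb; subst hab; exact hvnot ha⟩
            · intro w hw
              rcases List.mem_append.mp hw with hw | hw
              · exact hsimp.2.1 w hw
              · rw [List.mem_singleton] at hw; subst hw; exact ⟨hv0, hvn⟩
            · rw [List.isChain_append]
              refine ⟨hsimp.2.2, List.isChain_singleton v, ?_⟩
              intro x hx y hy
              rw [List.getLast?_eq_getLast hne, Option.mem_some_iff] at hx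
              simp only [List.head?_cons, Option.mem_some_iff] at hy
              subst hx; subst hy; exact hedge
          have := (ih (path ++ [v]) [] c (by simp) hsimp' (by
            simp only [List.length_append, List.length_singleton]; omega)).mp hvmem
          rcases this with h | rfl | ⟨hpre, hnepc, hsc, hlen⟩
          · simp at h
          · refine Or.inr (Or.inr ⟨List.prefix_append path [v], ?_, hsimp', ?_⟩)
            · intro hcp
              have := congrArg List.length hcp
              simp at this
            · push_cast [List.length_append, List.length_singleton]
              omega
          · refine Or.inr (Or.inr ⟨(List.prefix_append path [v]).trans hpre, ?_, hsc, hlen⟩)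
            intro hcp
            have h1 := hpre.length_le
            have := congrArg List.length hcp
            simp only [List.length_append, List.length_singleton] at h1 this
            omega
      · rintro (h | rfl | ⟨hpre, hnepc, hsc, hlen⟩)
        · exact Or.inl (Or.inl h)
        · exact Or.inl (Or.inr rfl)
        · -- backward: decompose the strict extension
          rcases hpre with ⟨t, rfl⟩
          have htne : t ≠ [] := by rintro rfl; simp at hnepc
          rcases t with _ | ⟨v, rest⟩
          · exact absurd rfl htne
          refine Or.inr ⟨v, ?_, ?_⟩
          · have hvmem : v ∈ path ++ v :: rest := by simp
            have := hsc.2.1 v hvmem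
            exact PySem.List.mem_pyRange_one.mpr this
          · have hvnot : v ∉ path := by
              have hnd := hsc.1
              rw [List.nodup_append] at hnd
              intro hv
              exact hnd.2.2 v hv v (List.mem_cons_self ..) rfl
            have hedge : adjAt adj (path.getLast hne) v = 1 := by
              have hch := hsc.2.2
              rw [List.isChain_append] at hch
              refine hch.2.2 _ ?_ v ?_
              · rw [List.getLast?_eq_getLast hne]; rfl
              · rfl
            have hcond : (adjAt adj (PySem.List.pyGetD path (-1) 0) v == 1 && !(path.contains v)) = true := by
              rw [hlast]
              simp [hedge, hvnot]
            rw [if_pos hcond]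
            rw [ih (path ++ [v]) [] (path ++ v :: rest) (by simp) ?hs (by
              simp only [List.length_append, List.length_singleton]; omega)]
            case hs =>
              refine ⟨?_, ?_, ?_⟩
              · have hnd := hsc.1
                rw [List.nodup_append] at hnd ⊢
                refine ⟨hnd.1, List.nodup_singleton v, ?_⟩
                intro a ha b hb hab
                rw [List.mem_singleton] at hb
                subst hb; subst hab; exact hvnot ha
              · intro w hw
                rcases List.mem_append.mp hw with hw | hw
                · exact hsc.2.1 w (List.mem_append_left _ hw)
                · rw [List.mem_singleton] at hw; subst hw
                  exact hsc.2.1 w (by simp)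
              · rw [List.isChain_append]
                refine ⟨hsimp.2.2, List.isChain_singleton v, ?_⟩
                intro x hx y hy
                rw [List.getLast?_eq_getLast hne, Option.mem_some_iff] at hx
                simp only [List.head?_cons, Option.mem_some_iff] at hy
                subst hx; subst hy; exact hedge
            rcases rest with _ | ⟨w, rest'⟩
            · exact Or.inr (Or.inl rfl)
            · refine Or.inr (Or.inr ⟨⟨w :: rest', by simp⟩, ?_, hsc, ?_⟩)
              · intro hcp
                have := congrArg List.length hcp
                simp at this
              · simpa using hlen


-- all simple arc-paths with at most md+1 vertices, as Source B's phase 1 collects them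
def pathsOf (adj : List (List Int)) (n md : Int) : List (List Int) :=
  (PySem.List.pyRange 0 n 1).foldl (fun paths s => dfsB adj n md n.toNat [s] paths) []

theorem mem_pathsOf (adj : List (List Int)) (n md : Int) (hmd : 1 ≤ md) (c : List Int) :
    c ∈ pathsOf adj n md ↔ c ≠ [] ∧ Simple adj n c ∧ (c.length : Int) ≤ md + 1 := by
  unfold pathsOf
  have hcongr := PySem.List.foldl_congr_mem (PySem.List.pyRange 0 n)
    (fun paths s => dfsB adj n md n.toNat [s] paths)
    (fun paths s => paths ++ dfsB adj n md n.toNat [s] [])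
    ([] : List (List Int))
    (fun paths s _ => dfsB_acc adj n md n.toNat [s] paths)
  rw [hcongr, PySem.List.foldl_append_eq_flatMap]
  simp only [List.nil_append, List.mem_flatMap]
  constructor
  · rintro ⟨s, hs, hmem⟩
    rcases PySem.List.mem_pyRange_one.mp hs with ⟨hs0, hsn⟩
    have hsimp : Simple adj n [s] :=
      ⟨List.nodup_singleton s, by intro v hv; rw [List.mem_singleton] at hv; subst hv; exact ⟨hs0, hsn⟩,
        List.isChain_singleton s⟩
    rcases (dfsB_mem adj n md n.toNat [s] [] c (by simp) hsimp (by simp)).mp hmem with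
      h | rfl | ⟨hpre, hnepc, hsc, hlen⟩
    · simp at h
    · exact ⟨by simp, hsimp, by simp; omega⟩
    · refine ⟨?_, hsc, hlen⟩
      rintro rfl
      rcases hpre with ⟨t, ht⟩
      simp at ht
  · rintro ⟨hne, hsc, hlen⟩
    rcases c with _ | ⟨s, rest⟩
    · exact absurd rfl hne
    have hs := hsc.2.1 s (List.mem_cons_self ..)
    have hsimp : Simple adj n [s] :=
      ⟨List.nodup_singleton s, by intro v hv; rw [List.mem_singleton] at hv; subst hv; exact hs,
        List.isChain_singleton s⟩
    refine ⟨s, PySem.List.mem_pyRange_one.mpr hs, ?_⟩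
    rw [dfsB_mem adj n md n.toNat [s] [] (s :: rest) (by simp) hsimp (by simp)]
    rcases rest with _ | ⟨w, rest'⟩
    · exact Or.inr (Or.inl rfl)
    · refine Or.inr (Or.inr ⟨⟨w :: rest', rfl⟩, ?_, hsc, hlen⟩)
      intro hcp
      have := congrArg List.length hcp
      simp at this


-- ===== A-side pure levels =====

def facesOK (prevList : List (List Int)) (p : Int) (cand : List Int) : Bool :=
  (PySem.List.pyRange 1 p 1).all (fun i =>
    (PySem.Set.ofList prevList).contains (PySem.List.slice cand none (some i) ++
                                          PySem.List.slice cand (some (i + 1)) none))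

def candOK (adj : List (List Int)) (prevList : List (List Int)) (p : Int)
    (path : List Int) (v : Int) : Bool :=
  !((PySem.Set.ofList path).contains v) &&
  (adjAt adj (PySem.List.pyGetD path (-1) 0) v == 1) &&
  facesOK prevList p (path ++ [v])

def stepA (adj : List (List Int)) (n : Int) (p : Int) (prevList : List (List Int)) :
    List (List Int) :=
  let prevSet := PySem.Set.ofList prevList
  prevList.foldl (fun acc path =>
    let last := PySem.List.pyGetD path (-1) 0
    let verts := PySem.Set.ofList path
    (PySem.List.pyRange 0 n 1).foldl (fun acc v =>
      if verts.contains v then acc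
      else if adjAt adj last v != 1 then acc
      else
        let cand := path ++ [v]
        if (PySem.List.pyRange 1 p 1).all (fun i =>
            prevSet.contains (PySem.List.slice cand none (some i) ++
                              PySem.List.slice cand (some (i + 1)) none)) then
          acc ++ [cand]
        else acc) acc) []

def level0 (n : Int) : List (List Int) := (PySem.List.pyRange 0 n 1).map (fun v => [v])

def level1 (adj : List (List Int)) (n : Int) : List (List Int) :=
  (PySem.List.pyRange 0 n 1).flatMap (fun i =>
    ((PySem.List.pyRange 0 n 1).filter (fun j => adjAt adj i j == 1 && i != j)).map
      (fun j => [i, j]))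

def levelA (adj : List (List Int)) (n : Int) : Nat → List (List Int)
  | 0 => level0 n
  | 1 => level1 adj n
  | (q + 2) => stepA adj n ((q : Int) + 2) (levelA adj n (q + 1))

theorem ite_chain {α : Type} (b1 b2 b3 : Bool) (a y : α) :
    (if b1 then a else if !b2 then a else if b3 then y else a) =
      (if (!b1 && b2 && b3) then y else a) := by
  cases b1 <;> cases b2 <;> cases b3 <;> simp

theorem stepA_eq_flatMap (adj : List (List Int)) (n p : Int) (prevList : List (List Int)) :
    stepA adj n p prevList = prevList.flatMap (fun path =>
      ((PySem.List.pyRange 0 n 1).filter (candOK adj prevList p path)).map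
        (fun v => path ++ [v])) := by
  unfold stepA
  have hinner : ∀ (path : List Int) (acc : List (List Int)),
      (PySem.List.pyRange 0 n 1).foldl (fun acc v =>
        if (PySem.Set.ofList path).contains v then acc
        else if adjAt adj (PySem.List.pyGetD path (-1) 0) v != 1 then acc
        else
          if (PySem.List.pyRange 1 p 1).all (fun i =>
              (PySem.Set.ofList prevList).contains
                (PySem.List.slice (path ++ [v]) none (some i) ++
                 PySem.List.slice (path ++ [v]) (some (i + 1)) none)) then
            acc ++ [path ++ [v]]
          else acc) acc =
      acc ++ ((PySem.List.pyRange 0 n 1).filter (candOK adj prevList p path)).map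
        (fun v => path ++ [v]) := by
    intro path acc
    have hcongr := PySem.List.foldl_congr_mem (PySem.List.pyRange 0 n)
      (fun acc v =>
        if (PySem.Set.ofList path).contains v then acc
        else if adjAt adj (PySem.List.pyGetD path (-1) 0) v != 1 then acc
        else
          if (PySem.List.pyRange 1 p 1).all (fun i =>
              (PySem.Set.ofList prevList).contains
                (PySem.List.slice (path ++ [v]) none (some i) ++
                 PySem.List.slice (path ++ [v]) (some (i + 1)) none)) then
            acc ++ [path ++ [v]]
          else acc)
      (fun acc v => if candOK adj prevList p path v then acc ++ [path ++ [v]] else acc)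
      acc (by
        intro acc v _
        unfold candOK facesOK
        exact ite_chain _ _ _ _ _)
    rw [hcongr, PySem.List.foldl_append_if]
  have hcongr2 := PySem.List.foldl_congr_mem prevList
    (fun acc path =>
      (PySem.List.pyRange 0 n 1).foldl (fun acc v =>
        if (PySem.Set.ofList path).contains v then acc
        else if adjAt adj (PySem.List.pyGetD path (-1) 0) v != 1 then acc
        else
          if (PySem.List.pyRange 1 p 1).all (fun i =>
              (PySem.Set.ofList prevList).contains
                (PySem.List.slice (path ++ [v]) none (some i) ++
                 PySem.List.slice (path ++ [v]) (some (i + 1)) none)) then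
            acc ++ [path ++ [v]]
          else acc) acc)
    (fun acc path => acc ++
      ((PySem.List.pyRange 0 n 1).filter (candOK adj prevList p path)).map
        (fun v => path ++ [v]))
    ([] : List (List Int)) (fun acc path _ => hinner path acc)
  exact hcongr2.trans (PySem.List.foldl_append_eq_flatMap _ _ _)

theorem mem_stepA (adj : List (List Int)) (n p : Int) (prevList : List (List Int))
    (c : List Int) :
    c ∈ stepA adj n p prevList ↔
      ∃ path ∈ prevList, ∃ v, (0 ≤ v ∧ v < n) ∧ candOK adj prevList p path v = true ∧
        c = path ++ [v] := by
  rw [stepA_eq_flatMap]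
  simp only [List.mem_flatMap, List.mem_map, List.mem_filter, PySem.List.mem_pyRange_one]
  constructor
  · rintro ⟨path, hpath, v, ⟨hv, hok⟩, rfl⟩
    exact ⟨path, hpath, v, hv, hok, rfl⟩
  · rintro ⟨path, hpath, v, hv, hok, rfl⟩
    exact ⟨path, hpath, v, ⟨hv, hok⟩, rfl⟩

-- A's dict after the level loop
def ADictBase (adj : List (List Int)) (n : Int) : PySem.Dict Int (List (List Int)) :=
  (PySem.Dict.empty.insert 0 (level0 n)).insert 1 (level1 adj n)

def ADict (adj : List (List Int)) (n md : Int) : PySem.Dict Int (List (List Int)) :=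
  (PySem.List.pyRange 2 (md + 1) 1).foldl (fun allowed p =>
    allowed.insert p (stepA adj n p (allowed.getD (p - 1) []))) (ADictBase adj n)

theorem portA_eq (adj : List (List Int)) (n : Int) (max_dim : Option Int) :
    compute_omega_dims adj n max_dim =
      (PySem.List.pyRange 0 ((max_dim.getD (n - 1)) + 1) 1).map
        (fun k => (k, (((ADict adj n (max_dim.getD (n - 1))).getD k []).length : Int))) := rfl

theorem ADict_le_one (adj : List (List Int)) (n md : Int) (h : md ≤ 1) :
    ADict adj n md = ADictBase adj n := by
  unfold ADict
  rw [PySem.List.pyRange_one_eq_nil (by omega)]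
  rfl

theorem ADict_getD (adj : List (List Int)) (n : Int) :
    ∀ (md k : Int), 0 ≤ k → (k ≤ 1 ∨ k ≤ md) →
      (ADict adj n md).getD k [] = levelA adj n k.toNat := by
  have hbase : ∀ k : Int, 0 ≤ k → k ≤ 1 →
      (ADictBase adj n).getD k [] = levelA adj n k.toNat := by
    intro k h0 h1
    interval_cases k
    · unfold ADictBase
      rw [PySem.Dict.getD_insert, if_neg (by norm_num), PySem.Dict.getD_insert,
        if_pos rfl]
      rfl
    · unfold ADictBase
      rw [PySem.Dict.getD_insert, if_pos rfl]
      rfl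
  have hmain : ∀ md : Int, 1 ≤ md → ∀ k : Int, 0 ≤ k → (k ≤ 1 ∨ k ≤ md) →
      (ADict adj n md).getD k [] = levelA adj n k.toNat := by
    intro md hmd
    induction md, hmd using Int.le_induction with
    | base =>
      intro k h0 h1
      rw [ADict_le_one adj n 1 le_rfl]
      exact hbase k h0 (by omega)
    | succ m hm ih =>
      intro k h0 h1
      have hsplit : PySem.List.pyRange 2 (m + 1 + 1) 1 =
          PySem.List.pyRange 2 (m + 1) 1 ++ [m + 1] :=
        PySem.List.pyRange_one_succ_right (by omega)
      have hfold : ADict adj n (m + 1) =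
          (ADict adj n m).insert (m + 1)
            (stepA adj n (m + 1) ((ADict adj n m).getD (m + 1 - 1) [])) := by
        unfold ADict
        rw [hsplit, List.foldl_append]
        rfl
      rw [hfold, PySem.Dict.getD_insert]
      by_cases hk : k = m + 1
      · rw [if_pos hk]
        have hgetD : (ADict adj n m).getD (m + 1 - 1) [] = levelA adj n m.toNat := by
          have : m + 1 - 1 = m := by ring
          rw [this]
          exact ih m (by omega) (Or.inr le_rfl)
        rw [hgetD]
        have hq : ∃ q' : Nat, m.toNat = q' + 1 := ⟨m.toNat - 1, by omega⟩
        rcases hq with ⟨q', hq'⟩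
        have hkn : k.toNat = q' + 2 := by omega
        rw [hkn, hq']
        show stepA adj n (m + 1) (levelA adj n (q' + 1)) =
          stepA adj n ((q' : Int) + 2) (levelA adj n (q' + 1))
        have : (m : Int) + 1 = (q' : Int) + 2 := by omega
        rw [this]
      · rw [if_neg hk]
        exact ih k h0 (by omega)
  intro md k h0 h1
  by_cases hmd : 1 ≤ md
  · exact hmain md hmd k h0 h1
  · rw [ADict_le_one adj n md (by omega)]
    exact hbase k h0 (by omega)


-- ===== B-side pure levels =====

def prev1 (adj : List (List Int)) (n md : Int) : PySem.Set (List Int) :=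
  PySem.Set.ofList ((pathsOf adj n md).filter (fun c => c.length == 2))

def acceptB (prev : PySem.Set (List Int)) (p : Int) (c : List Int) : Bool :=
  ((c.length : Int) == p + 1 &&
   PySem.Set.contains prev (PySem.List.slice c none (some (-1))) &&
   (PySem.List.pyRange 1 p 1).all (fun i =>
     PySem.Set.contains prev (PySem.List.slice c none (some i) ++
                              PySem.List.slice c (some (i + 1)) none)))

def stepB (adj : List (List Int)) (n md : Int) (p : Int) (prev : PySem.Set (List Int)) :
    PySem.Set (List Int) :=
  (pathsOf adj n md).foldl (fun cur c =>
    if acceptB prev p c then PySem.Set.add cur c else cur) PySem.Set.empty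

def setB (adj : List (List Int)) (n md : Int) : Nat → PySem.Set (List Int)
  | 0 => PySem.Set.empty
  | 1 => prev1 adj n md
  | (q + 2) => stepB adj n md ((q : Int) + 2) (setB adj n md (q + 1))

theorem mem_stepB (adj : List (List Int)) (n md p : Int) (prev : PySem.Set (List Int))
    (c : List Int) :
    c ∈ stepB adj n md p prev ↔ c ∈ pathsOf adj n md ∧ acceptB prev p c = true := by
  unfold stepB
  rw [mem_foldl_add_if]
  simp [PySem.Set.empty]

theorem nodup_stepB (adj : List (List Int)) (n md p : Int) (prev : PySem.Set (List Int)) :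
    (stepB adj n md p prev).Nodup := by
  unfold stepB
  exact nodup_foldl_add_if _ _ _ (List.nodup_nil)

theorem nodup_setB (adj : List (List Int)) (n md : Int) : ∀ q, (setB adj n md q).Nodup
  | 0 => List.nodup_nil
  | 1 => PySem.Set.nodup_ofList _
  | (_ + 2) => nodup_stepB _ _ _ _ _

-- B's counts dict after its level loop
def BFoldTo (adj : List (List Int)) (n md m : Int) :
    PySem.Dict Int Int × PySem.Set (List Int) :=
  (PySem.List.pyRange 2 (m + 1) 1).foldl
    (fun st p =>
      (st.1.insert p (PySem.Set.len (stepB adj n md p st.2)), stepB adj n md p st.2))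
    (((PySem.Dict.empty.insert 0 (max n 0)).insert 1 (PySem.Set.len (prev1 adj n md))),
      prev1 adj n md)

def countsB (adj : List (List Int)) (n md : Int) : PySem.Dict Int Int :=
  if md ≥ 1 then (BFoldTo adj n md md).1
  else if md ≥ 0 then PySem.Dict.empty.insert 0 (max n 0)
  else PySem.Dict.empty

theorem portB_eq (adj : List (List Int)) (n : Int) (max_dim : Option Int) :
    compute_omega_dims_alt adj n max_dim =
      (PySem.List.pyRange 0 ((max_dim.getD (n - 1)) + 1) 1).map
        (fun k => (k, (countsB adj n (max_dim.getD (n - 1))).getD k 0)) := by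
  unfold countsB BFoldTo stepB acceptB prev1 pathsOf
  dsimp only [compute_omega_dims_alt]
  by_cases h1 : max_dim.getD (n - 1) ≥ 1
  · rw [if_pos h1, if_pos (by omega : max_dim.getD (n - 1) ≥ 0), if_pos h1,
      if_pos h1]
  · rw [if_neg h1, if_neg h1]

theorem BFoldTo_snd (adj : List (List Int)) (n md : Int) :
    ∀ m, 1 ≤ m → (BFoldTo adj n md m).2 = setB adj n md m.toNat := by
  intro m hm
  induction m, hm using Int.le_induction with
  | base =>
    unfold BFoldTo
    rw [PySem.List.pyRange_one_eq_nil (by omega)]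
    rfl
  | succ m hm ih =>
    have hsplit : PySem.List.pyRange 2 (m + 1 + 1) 1 =
        PySem.List.pyRange 2 (m + 1) 1 ++ [m + 1] :=
      PySem.List.pyRange_one_succ_right (by omega)
    have hfold : BFoldTo adj n md (m + 1) =
        ((BFoldTo adj n md m).1.insert (m + 1)
          (PySem.Set.len (stepB adj n md (m + 1) (BFoldTo adj n md m).2)),
         stepB adj n md (m + 1) (BFoldTo adj n md m).2) := by
      unfold BFoldTo
      rw [hsplit, List.foldl_append]
      rfl
    rw [hfold]
    show stepB adj n md (m + 1) (BFoldTo adj n md m).2 = setB adj n md (m + 1).toNat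
    rw [ih]
    have hq : ∃ q' : Nat, m.toNat = q' + 1 := ⟨m.toNat - 1, by omega⟩
    rcases hq with ⟨q', hq'⟩
    have hkn : (m + 1).toNat = q' + 2 := by omega
    rw [hkn, hq']
    show stepB adj n md (m + 1) (setB adj n md (q' + 1)) =
      stepB adj n md ((q' : Int) + 2) (setB adj n md (q' + 1))
    have : (m : Int) + 1 = (q' : Int) + 2 := by omega
    rw [this]

theorem BFoldTo_getD (adj : List (List Int)) (n md : Int) :
    ∀ m, 1 ≤ m → ∀ k : Int,
      (BFoldTo adj n md m).1.getD k 0 =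
        if 2 ≤ k ∧ k ≤ m then PySem.Set.len (setB adj n md k.toNat)
        else ((PySem.Dict.empty.insert 0 (max n 0)).insert 1
          (PySem.Set.len (prev1 adj n md))).getD k 0 := by
  intro m hm
  induction m, hm using Int.le_induction with
  | base =>
    intro k
    rw [if_neg (by omega)]
    unfold BFoldTo
    rw [PySem.List.pyRange_one_eq_nil (by omega)]
    rfl
  | succ m hm ih =>
    intro k
    have hsplit : PySem.List.pyRange 2 (m + 1 + 1) 1 =
        PySem.List.pyRange 2 (m + 1) 1 ++ [m + 1] :=
      PySem.List.pyRange_one_succ_right (by omega)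
    have hfold : BFoldTo adj n md (m + 1) =
        ((BFoldTo adj n md m).1.insert (m + 1)
          (PySem.Set.len (stepB adj n md (m + 1) (BFoldTo adj n md m).2)),
         stepB adj n md (m + 1) (BFoldTo adj n md m).2) := by
      unfold BFoldTo
      rw [hsplit, List.foldl_append]
      rfl
    rw [hfold]
    show ((BFoldTo adj n md m).1.insert (m + 1)
        (PySem.Set.len (stepB adj n md (m + 1) (BFoldTo adj n md m).2))).getD k 0 = _
    rw [PySem.Dict.getD_insert]
    by_cases hk : k = m + 1
    · rw [if_pos hk, if_pos (by omega)]
      rw [BFoldTo_snd adj n md m hm]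
      have hq : ∃ q' : Nat, m.toNat = q' + 1 := ⟨m.toNat - 1, by omega⟩
      rcases hq with ⟨q', hq'⟩
      have hkn : k.toNat = q' + 2 := by omega
      rw [hkn, hq']
      show PySem.Set.len (stepB adj n md (m + 1) (setB adj n md (q' + 1))) =
        PySem.Set.len (stepB adj n md ((q' : Int) + 2) (setB adj n md (q' + 1)))
      have : (m : Int) + 1 = (q' : Int) + 2 := by omega
      rw [this]
    · rw [if_neg hk, ih k]
      by_cases h2 : 2 ≤ k ∧ k ≤ m
      · rw [if_pos h2, if_pos (by omega)]
      · rw [if_neg h2, if_neg (by omega)]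


-- ===== the core level-by-level equivalence =====

theorem core (adj : List (List Int)) (n md : Int) (hmd : 1 ≤ md) :
    ∀ q : Nat, 1 ≤ q → ((q : Int) ≤ md →
      (levelA adj n q).Nodup ∧
      (∀ c ∈ levelA adj n q, Simple adj n c ∧ c.length = q + 1) ∧
      (∀ c, c ∈ levelA adj n q ↔ c ∈ setB adj n md q)) := by
  intro q hq
  induction q, hq using Nat.le_induction with
  | base =>
    intro _
    have hmem1 : ∀ c, c ∈ levelA adj n 1 ↔
        ∃ i j : Int, (0 ≤ i ∧ i < n) ∧ (0 ≤ j ∧ j < n) ∧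
          adjAt adj i j = 1 ∧ i ≠ j ∧ c = [i, j] := by
      intro c
      show c ∈ level1 adj n ↔ _
      unfold level1
      simp only [List.mem_flatMap, List.mem_map, List.mem_filter,
        PySem.List.mem_pyRange_one, Bool.and_eq_true, beq_iff_eq, bne_iff_ne]
      constructor
      · rintro ⟨i, hi, j, ⟨hj, he, hne⟩, rfl⟩
        exact ⟨i, j, hi, hj, he, hne, rfl⟩
      · rintro ⟨i, j, hi, hj, he, hne, rfl⟩
        exact ⟨i, hi, j, ⟨hj, he, hne⟩, rfl⟩
    refine ⟨?_, ?_, ?_⟩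
    · show (level1 adj n).Nodup
      unfold level1
      refine nodup_flatMap_key _ _ (fun c => c.headI)
        (PySem.List.nodup_pyRange_one 0 n) ?_ ?_
      · intro i _
        refine List.Nodup.map ?_ ((PySem.List.nodup_pyRange_one 0 n).filter _)
        intro a b hab
        simpa using hab
      · intro i _ b hb
        rcases List.mem_map.mp hb with ⟨j, _, rfl⟩
        rfl
    · intro c hc
      rcases (hmem1 c).mp hc with ⟨i, j, hi, hj, he, hne, rfl⟩
      refine ⟨⟨?_, ?_, ?_⟩, rfl⟩
      · simp [hne]
      · intro v hv
        rcases List.mem_cons.mp hv with rfl | hv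
        · exact hi
        · rcases List.mem_cons.mp hv with rfl | hv
          · exact hj
          · simp at hv
      · exact (List.isChain_pair (R := fun a b => adjAt adj a b = 1)).mpr he
    · intro c
      rw [hmem1 c]
      show _ ↔ c ∈ prev1 adj n md
      unfold prev1
      rw [PySem.Set.mem_ofList, List.mem_filter]
      constructor
      · rintro ⟨i, j, hi, hj, he, hne, rfl⟩
        refine ⟨(mem_pathsOf adj n md hmd _).mpr ⟨by simp, ?_, by simp; omega⟩, by simp⟩
        refine ⟨by simp [hne], ?_, (List.isChain_pair (R := fun a b => adjAt adj a b = 1)).mpr he⟩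
        intro v hv
        rcases List.mem_cons.mp hv with rfl | hv
        · exact hi
        · rcases List.mem_cons.mp hv with rfl | hv
          · exact hj
          · simp at hv
      · rintro ⟨hcp, hlen2⟩
        rcases (mem_pathsOf adj n md hmd _).mp hcp with ⟨hne', hsc, _⟩
        have hlen2' : c.length = 2 := by simpa using hlen2
        have hc2 : ∃ i j : Int, c = [i, j] := by
          rcases c with _ | ⟨i, _ | ⟨j, _ | ⟨k, t⟩⟩⟩
          · simp at hlen2'
          · simp at hlen2'
          · exact ⟨i, j, rfl⟩
          · simp at hlen2'
        obtain ⟨i, j, rfl⟩ := hc2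
        have h4 : i ≠ j := by
          have := hsc.1
          simp at this
          exact this
        exact ⟨i, j, hsc.2.1 i (by simp), hsc.2.1 j (by simp),
          (List.isChain_pair (R := fun a b => adjAt adj a b = 1)).mp hsc.2.2, h4, rfl⟩
  | succ q hq1 ih =>
    intro hqmd
    have ihq := ih (by push_cast at hqmd ⊢; omega)
    obtain ⟨ihnd, ihmem, ihiff⟩ := ihq
    -- unfold levelA (q+1) and setB (q+1) through q = q' + 1
    obtain ⟨q', rfl⟩ : ∃ q', q = q' + 1 := ⟨q - 1, by omega⟩
    have hA : levelA adj n (q' + 1 + 1) =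
        stepA adj n ((q' : Int) + 2) (levelA adj n (q' + 1)) := rfl
    have hB : setB adj n md (q' + 1 + 1) =
        stepB adj n md ((q' : Int) + 2) (setB adj n md (q' + 1)) := rfl
    set p : Int := (q' : Int) + 2 with hp
    -- face-condition transfer
    have hfaces : ∀ c : List Int,
        facesOK (levelA adj n (q' + 1)) p c = true ↔
        ((PySem.List.pyRange 1 p 1).all (fun i =>
          PySem.Set.contains (setB adj n md (q' + 1))
            (PySem.List.slice c none (some i) ++
             PySem.List.slice c (some (i + 1)) none)) = true) := by
      intro c
      unfold facesOK
      simp only [List.all_eq_true]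
      constructor
      · intro h i hi
        rw [PySem.Set.contains_iff]
        rw [← ihiff]
        have := h i hi
        rw [PySem.Set.contains_iff, PySem.Set.mem_ofList] at this
        exact this
      · intro h i hi
        rw [PySem.Set.contains_iff, PySem.Set.mem_ofList, ihiff]
        have := h i hi
        rw [PySem.Set.contains_iff] at this
        exact this
    -- characterize membership on the A side
    have hmemA : ∀ c, c ∈ levelA adj n (q' + 1 + 1) ↔
        ∃ path ∈ levelA adj n (q' + 1), ∃ v, (0 ≤ v ∧ v < n) ∧
          candOK adj (levelA adj n (q' + 1)) p path v = true ∧ c = path ++ [v] := by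
      intro c
      rw [hA]
      exact mem_stepA adj n p (levelA adj n (q' + 1)) c
    -- extension facts
    have hext : ∀ path ∈ levelA adj n (q' + 1), ∀ v : Int, (0 ≤ v ∧ v < n) →
        candOK adj (levelA adj n (q' + 1)) p path v = true →
        Simple adj n (path ++ [v]) ∧ (path ++ [v]).length = q' + 1 + 1 + 1 := by
      intro path hpath v hv hok
      obtain ⟨hsp, hlp⟩ := ihmem path hpath
      have hpne : path ≠ [] := by
        intro h; rw [h] at hlp; simp at hlp
      unfold candOK at hok
      simp only [Bool.and_eq_true, Bool.not_eq_true'] at hok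
      obtain ⟨⟨hnc, hbe⟩, _⟩ := hok
      have hvnot : v ∉ path := by
        intro hvp
        have : (PySem.Set.ofList path).contains v = true :=
          (PySem.Set.contains_iff _ _).mpr ((PySem.Set.mem_ofList _ _).mpr hvp)
        rw [this] at hnc; cases hnc
      have hedge : adjAt adj (path.getLast hpne) v = 1 := by
        rw [PySem.List.pyGetD_neg_one path 0 hpne] at hbe
        exact beq_iff_eq.mp hbe
      refine ⟨⟨?_, ?_, ?_⟩, by simp [hlp]⟩
      · rw [List.nodup_append]
        exact ⟨hsp.1, List.nodup_singleton v, by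
          intro a ha b hb hab
          rw [List.mem_singleton] at hb
          subst hb; subst hab; exact hvnot ha⟩
      · intro w hw
        rcases List.mem_append.mp hw with hw | hw
        · exact hsp.2.1 w hw
        · rw [List.mem_singleton] at hw; subst hw; exact hv
      · rw [List.isChain_append]
        refine ⟨hsp.2.2, List.isChain_singleton v, ?_⟩
        intro x hx y hy
        rw [List.getLast?_eq_getLast hpne, Option.mem_some_iff] at hx
        simp only [List.head?_cons, Option.mem_some_iff] at hy
        subst hx; subst hy; exact hedge
    refine ⟨?_, ?_, ?_⟩
    · rw [hA, stepA_eq_flatMap]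
      refine nodup_flatMap_key _ _ (fun c => c.dropLast) ihnd ?_ ?_
      · intro path _
        refine List.Nodup.map ?_ ((PySem.List.nodup_pyRange_one 0 n).filter _)
        intro a b hab
        have := List.append_cancel_left hab
        simpa using this
      · intro path _ b hb
        rcases List.mem_map.mp hb with ⟨v, _, rfl⟩
        exact List.dropLast_concat
    · intro c hc
      rcases (hmemA c).mp hc with ⟨path, hpath, v, hv, hok, rfl⟩
      exact hext path hpath v hv hok
    · intro c
      rw [hmemA c, hB, mem_stepB]
      constructor
      · rintro ⟨path, hpath, v, hv, hok, rfl⟩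
        obtain ⟨hsc, hlc⟩ := hext path hpath v hv hok
        obtain ⟨hsp, hlp⟩ := ihmem path hpath
        refine ⟨(mem_pathsOf adj n md hmd _).mpr ⟨by simp, hsc, ?_⟩, ?_⟩
        · rw [hlc]; push_cast at hqmd ⊢; omega
        · unfold acceptB
          simp only [Bool.and_eq_true]
          refine ⟨⟨?_, ?_⟩, ?_⟩
          · rw [beq_iff_eq, hlc]; simp only [hp]; push_cast; ring
          · rw [PySem.List.slice_to_neg_one, List.dropLast_concat,
              PySem.Set.contains_iff, ← ihiff]
            exact hpath
          · unfold candOK at hok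
            simp only [Bool.and_eq_true] at hok
            exact (hfaces (path ++ [v])).mp hok.2
      · rintro ⟨hcp, hacc⟩
        rcases (mem_pathsOf adj n md hmd _).mp hcp with ⟨hcne, hsc, _⟩
        unfold acceptB at hacc
        simp only [Bool.and_eq_true] at hacc
        obtain ⟨⟨hlen, hpref⟩, hfc⟩ := hacc
        have hlenc : c.length = q' + 3 := by
          rw [beq_iff_eq, hp] at hlen
          omega
        have hsplitc : c.dropLast ++ [c.getLast hcne] = c :=
          List.dropLast_append_getLast hcne
        set path := c.dropLast with hpth
        set v := c.getLast hcne with hvv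
        have hpmem : path ∈ levelA adj n (q' + 1) := by
          rw [PySem.List.slice_to_neg_one, PySem.Set.contains_iff] at hpref
          rw [ihiff]
          exact hpref
        have hplen : path.length = q' + 2 := by
          rw [hpth, List.length_dropLast, hlenc]
          omega
        have hpne : path ≠ [] := by
          intro h; rw [h] at hplen; simp at hplen
        refine ⟨path, hpmem, v, ?_, ?_, hsplitc.symm⟩
        · exact hsc.2.1 v (hvv ▸ List.getLast_mem hcne)
        · unfold candOK
          simp only [Bool.and_eq_true]
          have hnd := hsc.1
          rw [← hsplitc, List.nodup_append] at hnd
          have hvnot : v ∉ path := fun hvp => hnd.2.2 v hvp v (List.mem_singleton.mpr rfl) rfl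
          refine ⟨⟨?_, ?_⟩, ?_⟩
          · rw [Bool.not_eq_true']
            rw [← Bool.not_eq_true, PySem.Set.contains_iff, PySem.Set.mem_ofList]
            exact hvnot
          · rw [PySem.List.pyGetD_neg_one path 0 hpne, beq_iff_eq]
            have hch := hsc.2.2
            rw [← hsplitc, List.isChain_append] at hch
            refine hch.2.2 _ ?_ v ?_
            · rw [List.getLast?_eq_getLast hpne]; rfl
            · rfl
          · rw [hsplitc, hfaces c]
            exact hfc

theorem levels_len_eq (adj : List (List Int)) (n md : Int) (hmd : 1 ≤ md)
    (q : Nat) (hq : 1 ≤ q) (hqmd : (q : Int) ≤ md) :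
    ((levelA adj n q).length : Int) = PySem.Set.len (setB adj n md q) := by
  obtain ⟨hnd, _, hiff⟩ := core adj n md hmd q hq hqmd
  have hperm := (List.perm_ext_iff_of_nodup hnd (nodup_setB adj n md q)).mpr hiff
  rw [PySem.Set.len_eq, hperm.length_eq]

-- ===== VERDICT =====
theorem compute_omega_dims_spec : Claim_equal_compute_omega_dims := by
  unfold Claim_equal_compute_omega_dims
  intro adj n max_dim _ _
  unfold Spec_compute_omega_dims
  rw [portA_eq, portB_eq]
  set md := max_dim.getD (n - 1) with hmd
  apply List.map_congr_left
  intro k hk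
  rcases PySem.List.mem_pyRange_one.mp hk with ⟨hk0, hk1⟩
  have hkmd : k ≤ md := by omega
  have hAside : (ADict adj n md).getD k [] = levelA adj n k.toNat :=
    ADict_getD adj n md k hk0 (Or.inr hkmd)
  have hzero : ((levelA adj n 0).length : Int) = max n 0 := by
    show ((level0 n).length : Int) = max n 0
    unfold level0
    rw [List.length_map, PySem.List.length_pyRange_one]
    rw [show (n : Int) - 0 = n by ring]
    exact Int.toNat_eq_max n
  refine Prod.ext rfl ?_
  show ((ADict adj n md).getD k []).length = (countsB adj n md).getD k 0
  rw [hAside]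
  by_cases h1 : md ≥ 1
  · rw [show countsB adj n md = (BFoldTo adj n md md).1 from if_pos h1,
      BFoldTo_getD adj n md md h1 k]
    by_cases h2 : 2 ≤ k ∧ k ≤ md
    · rw [if_pos h2]
      exact levels_len_eq adj n md h1 k.toNat (by omega) (by omega)
    · rw [if_neg h2]
      have hk01 : k = 0 ∨ k = 1 := by omega
      rcases hk01 with rfl | rfl
    -- k = 0
      · rw [PySem.Dict.getD_insert, if_neg (by norm_num),
          PySem.Dict.getD_insert, if_pos rfl]
        exact hzero
      · rw [PySem.Dict.getD_insert, if_pos rfl]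
        have := levels_len_eq adj n md h1 1 le_rfl (by omega)
        simpa using this
  · have hk00 : k = 0 := by omega
    subst hk00
    have hmd0 : md ≥ 0 := by omega
    rw [show countsB adj n md = PySem.Dict.empty.insert 0 (max n 0) by
      unfold countsB; rw [if_neg h1, if_pos hmd0]]
    rw [PySem.Dict.getD_insert, if_pos rfl]
    exact hzero
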